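-- pv_equiv track=rewrite | github.com/BTheDragonMaster/covid19 | scripts/map_pdb_to_ref2.py | make_mapping
-- ===== SOURCE A (Python) =====
-- def get_query_and_ref_ids(aligned_fasta_dict):
--     query_id = None
--     ref_id = None
--     for fasta_id in aligned_fasta_dict:
--         if not fasta_id.startswith('YP') and not fasta_id.startswith('P0'):
--             query_id = fasta_id
--         else:
--             ref_id = fasta_id
--
--
--
--     return query_id, ref_id
--
-- def make_mapping(aligned_fasta_dict):
--     query_id, ref_id = get_query_and_ref_ids(aligned_fasta_dict)
--
--     query_seq = aligned_fasta_dict[query_id]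
--     ref_seq = aligned_fasta_dict[ref_id]
--
--     mapping = {}
--
--     query_res = 0
--     ref_res = 0
--
--     for i, aa in enumerate(query_seq):
--         ref_aa = ref_seq[i]
--         if aa != '-':
--             query_res += 1
--
--
--         if ref_aa != '-':
--             ref_res += 1
--
--         if aa != '-' and ref_aa != '-':
--             mapping[query_res] = ref_res
--
--     return mapping
-- ===== SOURCE B (Python) =====
-- def get_query_and_ref_ids(aligned_fasta_dict):
--     query_id = None
--     ref_id = None
--     for fasta_id in aligned_fasta_dict:
--         if not fasta_id.startswith('YP') and not fasta_id.startswith('P0'):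
--             query_id = fasta_id
--         else:
--             ref_id = fasta_id
--
--     return query_id, ref_id
--
--
-- def make_mapping(aligned_fasta_dict):
--     query_id, ref_id = get_query_and_ref_ids(aligned_fasta_dict)
--
--     query_seq = aligned_fasta_dict[query_id]
--     ref_seq = aligned_fasta_dict[ref_id]
--
--     # Index: alignment column of each reference residue -> its residue number.
--     ref_res_at = {col: n + 1
--                   for n, col in enumerate(i for i, c in enumerate(ref_seq) if c != '-')}
--
--     # Probe the index with the column of each query residue.
--     mapping = {}
--     for n, col in enumerate(i for i, c in enumerate(query_seq) if c != '-'):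
--         if col in ref_res_at:
--             mapping[n + 1] = ref_res_at[col]
--     return mapping
-- ===== Notes on version B (the rewrite author's own statement) =====
-- stated objective: alternative
-- what changed: A walks the alignment once with two interleaved running residue counters, indexing ref_seq[i] inside the loop; B instead builds an index dict from alignment column to reference residue number (from the list of non-gap columns of ref_seq) and then probes that index with the column of each query residue, so no paired scan with running counters remains.
import Mathlib
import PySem

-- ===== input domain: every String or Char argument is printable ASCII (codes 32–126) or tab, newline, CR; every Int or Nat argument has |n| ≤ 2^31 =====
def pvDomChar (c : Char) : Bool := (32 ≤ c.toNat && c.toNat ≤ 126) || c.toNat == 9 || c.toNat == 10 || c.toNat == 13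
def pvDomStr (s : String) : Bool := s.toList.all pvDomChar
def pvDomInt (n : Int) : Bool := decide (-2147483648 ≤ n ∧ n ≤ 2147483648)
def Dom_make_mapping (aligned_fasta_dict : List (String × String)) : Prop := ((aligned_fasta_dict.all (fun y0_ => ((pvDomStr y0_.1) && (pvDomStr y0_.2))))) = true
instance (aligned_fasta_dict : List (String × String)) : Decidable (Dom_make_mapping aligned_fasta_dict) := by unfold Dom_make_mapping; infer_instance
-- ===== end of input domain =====

-- B replaces A's single paired scan with two interleaved residue counters by a column index:
-- it builds a dict from alignment column to reference residue number and probes it with the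
-- column of each query residue — an alternative decomposition of the same cost.

-- ===== PORT A =====
-- helper shared by both Pythons (identical in Source A and Source B)
def get_query_and_ref_ids (aligned_fasta_dict : List (String × String)) :
    Option String × Option String :=
  (PySem.Dict.keys (PySem.Dict.ofList aligned_fasta_dict)).foldl
    (fun st fasta_id =>
      if ¬ PySem.Str.startswith fasta_id "YP" = true ∧ ¬ PySem.Str.startswith fasta_id "P0" = true then
        (some fasta_id, st.2)
      else
        (st.1, some fasta_id))
    (none, none)

-- A's loop: enumerate(query_seq), indexing ref_seq[i], two interleaved counters.
def mmLoopA (rs : List Char) : List Char → Nat → Int → Int → PySem.Dict Int Int → PySem.Dict Int Int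
  | [], _, _, _, m => m
  | aa :: qt, i, q, r, m =>
    match PySem.List.pyGet? rs (i : Int) with
    | none => m   -- Python raises IndexError here; excluded by Pre_
    | some ref_aa =>
      let q' := if aa ≠ '-' then q + 1 else q
      let r' := if ref_aa ≠ '-' then r + 1 else r
      let m' := if aa ≠ '-' ∧ ref_aa ≠ '-' then m.insert q' r' else m
      mmLoopA rs qt (i + 1) q' r' m'

def make_mapping (aligned_fasta_dict : List (String × String)) : List (Int × Int) :=
  let ids := get_query_and_ref_ids aligned_fasta_dict
  match ids.1, ids.2 with
  | some query_id, some ref_id =>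
    match (PySem.Dict.ofList aligned_fasta_dict).get? query_id,
          (PySem.Dict.ofList aligned_fasta_dict).get? ref_id with
    | some query_seq, some ref_seq =>
        (mmLoopA ref_seq.toList query_seq.toList 0 0 0 PySem.Dict.empty).items
    | _, _ => []   -- unreachable: both ids come from the dict's keys
  | _, _ => []     -- Python raises KeyError (an id is None); excluded by Pre_

-- ===== PORT B =====
-- Source B's own identical copy of the id-selection helper
def get_query_and_ref_ids_alt (aligned_fasta_dict : List (String × String)) :
    Option String × Option String :=
  (PySem.Dict.keys (PySem.Dict.ofList aligned_fasta_dict)).foldl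
    (fun st fasta_id =>
      if ¬ PySem.Str.startswith fasta_id "YP" = true ∧ ¬ PySem.Str.startswith fasta_id "P0" = true then
        (some fasta_id, st.2)
      else
        (st.1, some fasta_id))
    (none, none)

-- '[i for i, c in enumerate(seq) if c != '-']': the alignment columns holding a residue
def pvColsAt (i0 : Int) (s : List Char) : List Int :=
  ((PySem.List.enumerate s i0).filter (fun p => p.2 ≠ '-')).map (·.1)

-- '{col: n + 1 for n, col in enumerate(…)}': column ↦ reference residue number
def pvBuildRef (rs : List Char) : PySem.Dict Int Int :=
  (PySem.List.enumerate (pvColsAt 0 rs)).foldl (fun d p => d.insert p.2 (p.1 + 1)) PySem.Dict.empty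

def make_mapping_alt (aligned_fasta_dict : List (String × String)) : List (Int × Int) :=
  match get_query_and_ref_ids_alt aligned_fasta_dict with
  | (some query_id, some ref_id) =>
    match ((PySem.Dict.ofList aligned_fasta_dict).get? query_id,
           (PySem.Dict.ofList aligned_fasta_dict).get? ref_id) with
    | (some query_seq, some ref_seq) =>
      let ref_res_at := pvBuildRef ref_seq.toList
      ((PySem.List.enumerate (pvColsAt 0 query_seq.toList)).foldl
        (fun m p =>
          if ref_res_at.contains p.2 then m.insert (p.1 + 1) (ref_res_at.getD p.2 0) else m)
        PySem.Dict.empty).items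
    | (some _, none) => []   -- unreachable: both ids come from the dict's keys
    | (none, _) => []        -- unreachable: both ids come from the dict's keys
  | (some _, none) => []     -- Python raises KeyError (ref_id is None); excluded by Pre_
  | (none, _) => []          -- Python raises KeyError (query_id is None); excluded by Pre_

-- ===== PRECONDITION & SPEC =====
def pvIsQueryKey (s : String) : Bool :=
  !PySem.Str.startswith s "YP" && !PySem.Str.startswith s "P0"

-- last key of the dict satisfying p (what A's selection loop leaves in each variable)
def pvLastKey (aligned_fasta_dict : List (String × String)) (p : String → Bool) : Option String :=
  ((PySem.Dict.keys (PySem.Dict.ofList aligned_fasta_dict)).filter p).getLast?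

-- Pre_ excludes exactly the inputs where Python A raises: no query key / no reference key
-- (the dict lookup with id None raises KeyError), or the reference sequence is shorter than
-- the query sequence (ref_seq[i] raises IndexError).
def Pre_make_mapping (aligned_fasta_dict : List (String × String)) : Prop :=
  (pvLastKey aligned_fasta_dict pvIsQueryKey).isSome = true ∧
  (pvLastKey aligned_fasta_dict (fun k => !pvIsQueryKey k)).isSome = true ∧
  PySem.Str.len ((PySem.Dict.ofList aligned_fasta_dict).getD
      ((pvLastKey aligned_fasta_dict pvIsQueryKey).getD "") "") ≤
  PySem.Str.len ((PySem.Dict.ofList aligned_fasta_dict).getD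
      ((pvLastKey aligned_fasta_dict (fun k => !pvIsQueryKey k)).getD "") "")

instance (aligned_fasta_dict : List (String × String)) : Decidable (Pre_make_mapping aligned_fasta_dict) := by
  unfold Pre_make_mapping; infer_instance

def pvWitness_make_mapping : (List (String × String)) := [("Q1", "AB-C"), ("YP1", "A-BC")]

def Spec_make_mapping (aligned_fasta_dict : List (String × String)) (out : List (Int × Int)) : Prop := out = make_mapping_alt aligned_fasta_dict
instance (aligned_fasta_dict : List (String × String)) (out : List (Int × Int)) : Decidable (Spec_make_mapping aligned_fasta_dict out) := by unfold Spec_make_mapping; infer_instance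

-- ===== CLAIM (what is proved, stated in full; the proofs are below) =====
def Claim_equal_make_mapping : Prop := ∀ (aligned_fasta_dict : List (String × String)), Dom_make_mapping aligned_fasta_dict → Pre_make_mapping aligned_fasta_dict → Spec_make_mapping aligned_fasta_dict (make_mapping aligned_fasta_dict)


-- ===== LEMMAS AND PROOFS =====

-- non-gap residue count in the first k alignment columns
def cntNG (r : List Char) (k : Nat) : Int := ((r.take k).countP (fun c => c ≠ '-') : Int)

theorem cntNG_zero (r : List Char) : cntNG r 0 = 0 := by simp [cntNG]

theorem cntNG_succ (r : List Char) (k : Nat) (h : k < r.length) :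
    cntNG r (k + 1) = cntNG r k + (if r[k] ≠ '-' then 1 else 0) := by
  unfold cntNG
  rw [List.take_add_one, List.getElem?_eq_getElem h]
  simp only [Option.toList_some, List.countP_append, List.countP_cons, List.countP_nil]
  split_ifs with hc <;> simp_all

theorem colsAt_nil (i0 : Int) : pvColsAt i0 [] = [] := by simp [pvColsAt]

theorem colsAt_cons (i0 : Int) (c : Char) (t : List Char) :
    pvColsAt i0 (c :: t)
      = if c ≠ '-' then i0 :: pvColsAt (i0 + 1) t else pvColsAt (i0 + 1) t := by
  simp only [pvColsAt, PySem.List.enumerate_cons, List.filter_cons]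
  split_ifs with h <;> simp_all

theorem colsAt_append (i0 : Int) (a b : List Char) :
    pvColsAt i0 (a ++ b) = pvColsAt i0 a ++ pvColsAt (i0 + a.length) b := by
  induction a generalizing i0 with
  | nil => simp [colsAt_nil]
  | cons c t ih =>
    simp only [List.cons_append, colsAt_cons, ih, List.length_cons]
    split_ifs <;> simp <;> ring_nf

theorem length_colsAt (i0 : Int) (a : List Char) :
    (pvColsAt i0 a).length = a.countP (fun c => c ≠ '-') := by
  induction a generalizing i0 with
  | nil => simp [colsAt_nil]
  | cons c t ih =>
    rw [colsAt_cons]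
    split_ifs with h <;> simp [ih, h]

-- keys inserted by the index-building fold over columns ≥ i0 do not touch smaller keys
theorem buildRefAux_get_lt (t : List Char) :
    ∀ (i0 : Int) (n0 : Int) (d : PySem.Dict Int Int) (j : Int), j < i0 →
      ((PySem.List.enumerate (pvColsAt i0 t) n0).foldl
          (fun d p => d.insert p.2 (p.1 + 1)) d).get? j = d.get? j := by
  induction t with
  | nil => intro i0 n0 d j _; simp [colsAt_nil]
  | cons c t ih =>
    intro i0 n0 d j hj
    rw [colsAt_cons]
    split_ifs with h
    · rw [PySem.List.enumerate_cons, List.foldl_cons]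
      rw [ih (i0 + 1) (n0 + 1) _ j (by omega)]
      exact PySem.Dict.get?_insert_of_ne _ _ (by omega)
    · exact ih (i0 + 1) n0 d j (by omega)

-- …nor keys at or beyond the end of the scanned block
theorem buildRefAux_get_ge (t : List Char) :
    ∀ (i0 : Int) (n0 : Int) (d : PySem.Dict Int Int) (j : Int), i0 + t.length ≤ j →
      ((PySem.List.enumerate (pvColsAt i0 t) n0).foldl
          (fun d p => d.insert p.2 (p.1 + 1)) d).get? j = d.get? j := by
  induction t with
  | nil => intro i0 n0 d j _; simp [colsAt_nil]
  | cons c t ih =>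
    intro i0 n0 d j hj
    rw [colsAt_cons]
    simp only [List.length_cons] at hj
    split_ifs with h
    · rw [PySem.List.enumerate_cons, List.foldl_cons]
      rw [ih (i0 + 1) (n0 + 1) _ j (by push_cast at hj ⊢; omega)]
      exact PySem.Dict.get?_insert_of_ne _ _ (by omega)
    · exact ih (i0 + 1) n0 d j (by push_cast at hj ⊢; omega)

-- the head column of the scanned block
theorem buildRefAux_get_head (c : Char) (t : List Char) (i0 n0 : Int) (d : PySem.Dict Int Int) :
    ((PySem.List.enumerate (pvColsAt i0 (c :: t)) n0).foldl
        (fun d p => d.insert p.2 (p.1 + 1)) d).get? i0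
      = if c ≠ '-' then some (n0 + 1) else d.get? i0 := by
  rw [colsAt_cons]
  split_ifs with h
  · rw [PySem.List.enumerate_cons, List.foldl_cons,
        buildRefAux_get_lt t (i0 + 1) (n0 + 1) _ i0 (by omega)]
    exact PySem.Dict.get?_insert_self _ _ _
  · exact buildRefAux_get_lt t (i0 + 1) n0 d i0 (by omega)

-- the index at the column of the first char of t, in a split alignment a ++ c :: t
theorem buildRef_get_split (a : List Char) (c : Char) (t : List Char) :
    (pvBuildRef (a ++ c :: t)).get? (a.length : Int)
      = if c ≠ '-' then some ((a.countP (fun x => x ≠ '-') : Int) + 1) else none := by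
  unfold pvBuildRef
  rw [colsAt_append, PySem.List.enumerate_append, List.foldl_append]
  have hlen : ((pvColsAt 0 a).length : Int) = (a.countP (fun x => x ≠ '-') : Int) := by
    rw [length_colsAt]
  rw [show ((0 : Int) + (pvColsAt 0 a).length) = ((a.countP (fun x => x ≠ '-') : Int)) by
        rw [hlen]; ring]
  rw [show ((0 : Int) + (a.length : Int)) = (a.length : Int) by ring] at *
  rw [buildRefAux_get_head]
  split_ifs with hc
  · rfl
  · rw [buildRefAux_get_ge a 0 0 _ (a.length : Int) (by omega)]
    simp

-- full characterisation of B's column index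
theorem buildRef_get (r : List Char) (i0 : Nat) (h : i0 < r.length) :
    (pvBuildRef r).get? (i0 : Int)
      = if r[i0] ≠ '-' then some (cntNG r i0 + 1) else none := by
  have hsplit : r = r.take i0 ++ r[i0] :: r.drop (i0 + 1) := by
    rw [← List.drop_eq_getElem_cons h, List.take_append_drop]
  have hl : ((r.take i0).length : Int) = (i0 : Int) := by
    rw [List.length_take_of_le (by omega)]
  have key := buildRef_get_split (r.take i0) (r[i0]) (r.drop (i0 + 1))
  rw [hl] at key
  calc (pvBuildRef r).get? (i0 : Int)
      = (pvBuildRef (r.take i0 ++ r[i0] :: r.drop (i0 + 1))).get? (i0 : Int) := by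
        conv_lhs => rw [hsplit]
    _ = if r[i0] ≠ '-' then some (cntNG r i0 + 1) else none := by
        rw [key]; rfl

-- main loop equivalence: A's interleaved counters against B's index probing
theorem loop_eq (r : List Char) (qt : List Char) :
    ∀ (i0 : Nat) (n0 : Int) (m : PySem.Dict Int Int),
      i0 + qt.length ≤ r.length →
      mmLoopA r qt i0 n0 (cntNG r i0) m
        = (PySem.List.enumerate (pvColsAt (i0 : Int) qt) n0).foldl
            (fun m p =>
              if (pvBuildRef r).contains p.2 then
                m.insert (p.1 + 1) ((pvBuildRef r).getD p.2 0)
              else m) m := by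
  induction qt with
  | nil => intro i0 n0 m _; simp [mmLoopA, colsAt_nil]
  | cons aa qt ih =>
    intro i0 n0 m h
    simp only [List.length_cons] at h
    have hi : i0 < r.length := by omega
    have hget : PySem.List.pyGet? r (i0 : Int) = some r[i0] := by
      simp [PySem.List.pyGet?, PySem.List.pyIdx?, hi]
    have hcast : ((i0 : Int) + 1) = (((i0 + 1 : Nat)) : Int) := by push_cast; ring
    by_cases hc : r[i0] = '-' <;> by_cases haa : aa = '-'
    · -- gap in both: neither side emits, neither counter moves
      have hcnt2 : cntNG r i0 = cntNG r (i0 + 1) := by rw [cntNG_succ r i0 hi]; simp [hc]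
      simp only [mmLoopA, hget, colsAt_cons, hc, haa, ne_eq, not_true_eq_false, ite_false,
        and_false]
      rw [hcnt2, hcast]
      exact ih (i0 + 1) n0 m (by omega)
    · -- query residue over a reference gap: no entry on either side
      have hcnt2 : cntNG r i0 = cntNG r (i0 + 1) := by rw [cntNG_succ r i0 hi]; simp [hc]
      have hcontains : (pvBuildRef r).contains ((i0 : Nat) : Int) = false := by
        rw [PySem.Dict.contains_eq_isSome_get?, buildRef_get r i0 hi]; simp [hc]
      simp only [mmLoopA, hget, colsAt_cons, hc, haa, ne_eq, not_true_eq_false, ite_false,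
        not_false_eq_true, ite_true, and_false, PySem.List.enumerate_cons,
        List.foldl_cons, hcontains, Bool.false_eq_true]
      rw [hcnt2, hcast]
      exact ih (i0 + 1) (n0 + 1) m (by omega)
    · -- query gap over a reference residue: no entry, reference counter moves
      have hcnt : cntNG r i0 + 1 = cntNG r (i0 + 1) := by rw [cntNG_succ r i0 hi]; simp [hc]
      simp only [mmLoopA, hget, colsAt_cons, hc, haa, ne_eq, not_true_eq_false, ite_false,
        not_false_eq_true, ite_true, false_and]
      rw [hcnt, hcast]
      exact ih (i0 + 1) n0 m (by omega)
    · -- residue in both: both sides record the same pair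
      have hcnt : cntNG r i0 + 1 = cntNG r (i0 + 1) := by rw [cntNG_succ r i0 hi]; simp [hc]
      have hcontains : (pvBuildRef r).contains ((i0 : Nat) : Int) = true := by
        rw [PySem.Dict.contains_eq_isSome_get?, buildRef_get r i0 hi]; simp [hc]
      have hgetD : (pvBuildRef r).getD ((i0 : Nat) : Int) 0 = cntNG r i0 + 1 := by
        rw [PySem.Dict.getD_eq_get?_getD, buildRef_get r i0 hi, if_pos (by simp [hc])]; rfl
      simp only [mmLoopA, hget, colsAt_cons, hc, haa, ne_eq, not_false_eq_true, ite_true,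
        and_self, PySem.List.enumerate_cons, List.foldl_cons, hcontains, hgetD]
      rw [hcnt, hcast]
      exact ih (i0 + 1) (n0 + 1) (m.insert (n0 + 1) (cntNG r (i0 + 1))) (by omega)

-- A's selection loop computes the last matching key on each side.
theorem getLast?_cons_eq_or {α : Type} (k : α) (xs : List α) :
    (k :: xs).getLast? = xs.getLast?.or (some k) := by
  cases xs with
  | nil => simp
  | cons y ys =>
    have h : ((y :: ys).getLast?).isSome := by simp [List.getLast?_isSome]
    obtain ⟨v, hv⟩ := Option.isSome_iff_exists.mp h
    simp [List.getLast?_cons_cons, hv, Option.or]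

theorem getLast?_cons_or {α : Type} (k : α) (xs : List α) (a : Option α) :
    ((k :: xs).getLast?).or a = xs.getLast?.or (some k) := by
  rw [getLast?_cons_eq_or]
  cases h : xs.getLast? <;> simp [Option.or]

theorem fold_ids_eq (l : List String) (a b : Option String) :
    l.foldl
      (fun st fasta_id =>
        if ¬ PySem.Str.startswith fasta_id "YP" = true ∧ ¬ PySem.Str.startswith fasta_id "P0" = true then
          (some fasta_id, st.2)
        else
          (st.1, some fasta_id))
      (a, b)
    = (((l.filter pvIsQueryKey).getLast?).or a,
       ((l.filter (fun k => !pvIsQueryKey k)).getLast?).or b) := by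
  induction l generalizing a b with
  | nil => simp
  | cons k t ih =>
    by_cases hc : (¬ PySem.Str.startswith k "YP" = true ∧ ¬ PySem.Str.startswith k "P0" = true)
    · have e1 : PySem.Str.startswith k "YP" = false := Bool.eq_false_iff.mpr hc.1
      have e2 : PySem.Str.startswith k "P0" = false := Bool.eq_false_iff.mpr hc.2
      have hk : pvIsQueryKey k = true := by unfold pvIsQueryKey; rw [e1, e2]; rfl
      have h1 : List.filter pvIsQueryKey (k :: t) = k :: List.filter pvIsQueryKey t := by
        simp [hk]
      have h2 : List.filter (fun x => !pvIsQueryKey x) (k :: t)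
          = List.filter (fun x => !pvIsQueryKey x) t := by
        simp [hk]
      rw [List.foldl_cons, if_pos hc, ih, h1, h2, getLast?_cons_or]
    · have hk : pvIsQueryKey k = false := by
        rcases not_and_or.mp hc with h | h
        · unfold pvIsQueryKey; rw [not_not.mp h]; rfl
        · unfold pvIsQueryKey; rw [not_not.mp h]; simp
      have h1 : List.filter pvIsQueryKey (k :: t) = List.filter pvIsQueryKey t := by
        simp [hk]
      have h2 : List.filter (fun x => !pvIsQueryKey x) (k :: t)
          = k :: List.filter (fun x => !pvIsQueryKey x) t := by
        simp [hk]
      rw [List.foldl_cons, if_neg hc, ih, h1, h2, getLast?_cons_or]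

theorem ids_eq (d : List (String × String)) :
    get_query_and_ref_ids d
      = (pvLastKey d pvIsQueryKey, pvLastKey d (fun k => !pvIsQueryKey k)) := by
  unfold get_query_and_ref_ids pvLastKey
  rw [fold_ids_eq]
  rw [Option.or_none, Option.or_none]

theorem ids_alt_eq (d : List (String × String)) :
    get_query_and_ref_ids_alt d
      = (pvLastKey d pvIsQueryKey, pvLastKey d (fun k => !pvIsQueryKey k)) := by
  unfold get_query_and_ref_ids_alt pvLastKey
  rw [fold_ids_eq]
  rw [Option.or_none, Option.or_none]

-- get? succeeds on any key produced by pvLastKey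
theorem get?_isSome_of_lastKey (d : List (String × String)) (p : String → Bool) (k : String)
    (h : pvLastKey d p = some k) :
    ∃ s, (PySem.Dict.ofList d).get? k = some s := by
  have hk : k ∈ (PySem.Dict.keys (PySem.Dict.ofList d)).filter p := by
    unfold pvLastKey at h
    exact List.mem_of_getLast? h
  have hk' : k ∈ PySem.Dict.keys (PySem.Dict.ofList d) := (List.mem_filter.mp hk).1
  cases hg : (PySem.Dict.ofList d).get? k with
  | none =>
    exfalso
    have hcf : (PySem.Dict.ofList d).contains k = false :=
      (PySem.Dict.get?_eq_none_iff_contains _ _).mp hg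
    have hct : (PySem.Dict.ofList d).contains k = true :=
      (PySem.Dict.contains_iff_mem_keys _ _).mpr hk'
    rw [hct] at hcf
    exact Bool.noConfusion hcf
  | some s => exact ⟨s, rfl⟩

-- ===== VERDICT (by name: the statement is the Claim_ definition above) =====
theorem make_mapping_spec : Claim_equal_make_mapping := by
  intro d _hdom hpre
  unfold Spec_make_mapping
  obtain ⟨hq, hr, hlen⟩ := hpre
  obtain ⟨qk, hqk⟩ := Option.isSome_iff_exists.mp hq
  obtain ⟨rk, hrk⟩ := Option.isSome_iff_exists.mp hr
  obtain ⟨qs, hqs⟩ := get?_isSome_of_lastKey d pvIsQueryKey qk hqk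
  obtain ⟨rs, hrs⟩ := get?_isSome_of_lastKey d (fun k => !pvIsQueryKey k) rk hrk
  have hlen' : qs.toList.length ≤ rs.toList.length := by
    rw [hqk, hrk] at hlen
    simp only [Option.getD_some] at hlen
    rw [PySem.Dict.getD_eq_get?_getD, PySem.Dict.getD_eq_get?_getD, hqs, hrs] at hlen
    simp only [Option.getD_some, PySem.Str.len_eq] at hlen
    exact_mod_cast hlen
  unfold make_mapping make_mapping_alt
  rw [ids_eq, ids_alt_eq]
  simp only [hqk, hrk, hqs, hrs]
  have := loop_eq rs.toList qs.toList 0 0 PySem.Dict.empty (by omega)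
  rw [cntNG_zero] at this
  rw [show ((0 : Nat) : Int) = (0 : Int) by norm_num] at this
  rw [this]
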